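-- pv_equiv track=rewrite | github.com/Majic10/algorithms | random_challenges.py | sum_between_min_and_max
-- ===== SOURCE A (Python) =====
-- def sum_between_min_and_max(numbers):
--     if len(numbers) <= 2:
--         return 0
--
--     min_index = max_index = 0
--     min_number = max_number = numbers[0]
--
--     for index, number in enumerate(numbers):
--         if number > max_number:
--             max_index = index
--             max_number = number
--         if number < min_number:
--             min_index = index
--             min_number = number
--
--     return sum(numbers[min_index + 1:max_index])
-- ===== SOURCE B (Python) =====
-- def sum_between_min_and_max(numbers):
--     if len(numbers) <= 2:
--         return 0
--     lo, hi = _extrema(numbers, 0, len(numbers))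
--     return sum(numbers[lo + 1:hi])
--
--
-- def _extrema(a, s, e):
--     """First-occurrence (min index, max index) of a[s:e], by divide and conquer.
--
--     Correct because the first min/max of a range is the better of the first
--     min/max of its two halves, preferring the left half on value ties."""
--     if e - s == 1:
--         return s, s
--     m = (s + e) // 2
--     l1, h1 = _extrema(a, s, m)
--     l2, h2 = _extrema(a, m, e)
--     lo = l1 if a[l1] <= a[l2] else l2
--     hi = h1 if a[h1] >= a[h2] else h2
--     return lo, hi
-- ===== Notes on version B (the rewrite author's own statement) =====
-- stated objective: alternative
-- what changed: Replaces A's single left-to-right scan carrying four accumulators by a divide-and-conquer recursion that finds the first-occurrence min and max indices by halving the range and merging (left half wins value ties), then sums the slice between them.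
import Mathlib
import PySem

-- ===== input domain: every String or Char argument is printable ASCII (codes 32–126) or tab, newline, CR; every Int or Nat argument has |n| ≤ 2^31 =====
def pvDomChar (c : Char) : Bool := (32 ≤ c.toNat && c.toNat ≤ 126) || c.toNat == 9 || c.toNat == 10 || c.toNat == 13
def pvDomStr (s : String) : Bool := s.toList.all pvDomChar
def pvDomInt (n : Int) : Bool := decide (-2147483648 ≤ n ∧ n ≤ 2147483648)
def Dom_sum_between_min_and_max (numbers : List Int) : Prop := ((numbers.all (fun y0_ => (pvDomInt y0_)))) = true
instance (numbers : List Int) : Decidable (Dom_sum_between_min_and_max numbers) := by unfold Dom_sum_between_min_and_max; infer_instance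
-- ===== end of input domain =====

-- B finds the first-occurrence min/max indices by divide-and-conquer on index ranges instead of A's single accumulator scan, then sums the slice between them; objective: alternative.


-- ===== PORT A =====
-- the loop: two independent (index, value) accumulators, strict comparison keeps the first extremum
def sum_between_min_and_max (numbers : List Int) : Int :=
  if numbers.length ≤ 2 then 0
  else
    let x := numbers.headD 0  -- numbers[0]: the list is nonempty under the guard
    let st := (PySem.List.enumerate numbers 0).foldl
        (fun (s : (Int × Int) × (Int × Int)) (p : Int × Int) =>
          (if p.2 < s.1.2 then (p.1, p.2) else s.1,   -- min check
           if p.2 > s.2.2 then (p.1, p.2) else s.2))  -- max check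
        ((0, x), (0, x))
    (PySem.List.slice numbers (some (st.1.1 + 1)) (some st.2.1)).sum

-- ===== PORT B =====
-- _extrema(a, s, e): divide and conquer; Python's base test is 'e - s == 1', the '≤ 1'
-- here only totalizes the recursion (the function is never called with e ≤ s).
def pvExtrema (a : List Int) (s e : Int) : Int × Int :=
  if e - s ≤ 1 then (s, s)
  else
    let m := PySem.Int.floordiv (s + e) 2
    let p := pvExtrema a s m
    let q := pvExtrema a m e
    (if PySem.List.pyGetD a p.1 0 ≤ PySem.List.pyGetD a q.1 0 then p.1 else q.1,
     if PySem.List.pyGetD a p.2 0 ≥ PySem.List.pyGetD a q.2 0 then p.2 else q.2)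
termination_by (e - s).toNat
decreasing_by
  all_goals
    have h1 : s + 1 ≤ PySem.Int.floordiv (s + e) 2 :=
      (PySem.Int.le_floordiv_iff_mul_le (by omega)).mpr (by omega)
    have h2 : PySem.Int.floordiv (s + e) 2 < e :=
      (PySem.Int.floordiv_lt_iff_lt_mul (by omega)).mpr (by omega)
    omega

def sum_between_min_and_max_alt (numbers : List Int) : Int :=
  if numbers.length ≤ 2 then 0
  else
    let p := pvExtrema numbers 0 numbers.length
    (PySem.List.slice numbers (some (p.1 + 1)) (some p.2)).sum

-- ===== PRECONDITION & SPEC =====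
def Spec_sum_between_min_and_max (numbers : List Int) (out : Int) : Prop := out = sum_between_min_and_max_alt numbers
instance (numbers : List Int) (out : Int) : Decidable (Spec_sum_between_min_and_max numbers out) := by unfold Spec_sum_between_min_and_max; infer_instance

-- ===== CLAIM (what is proved, stated in full; the proofs are below) =====
def Claim_equal_sum_between_min_and_max : Prop := ∀ (numbers : List Int), Dom_sum_between_min_and_max numbers → Spec_sum_between_min_and_max numbers (sum_between_min_and_max numbers)

-- ===== LEMMAS AND PROOFS =====

-- 'i is the first index of the minimum of a[s:e]' (values read as Python's a[i])
def pvFirstMin (a : List Int) (s e i : Int) : Prop :=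
  s ≤ i ∧ i < e ∧ (∀ j, s ≤ j → j < e → PySem.List.pyGetD a i 0 ≤ PySem.List.pyGetD a j 0) ∧
  (∀ j, s ≤ j → j < i → PySem.List.pyGetD a i 0 < PySem.List.pyGetD a j 0)

def pvFirstMax (a : List Int) (s e i : Int) : Prop :=
  s ≤ i ∧ i < e ∧ (∀ j, s ≤ j → j < e → PySem.List.pyGetD a j 0 ≤ PySem.List.pyGetD a i 0) ∧
  (∀ j, s ≤ j → j < i → PySem.List.pyGetD a j 0 < PySem.List.pyGetD a i 0)

theorem pvFirstMin_unique {a : List Int} {s e i i' : Int}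
    (h : pvFirstMin a s e i) (h' : pvFirstMin a s e i') : i = i' := by
  obtain ⟨hs, he, hmin, hfst⟩ := h
  obtain ⟨hs', he', hmin', hfst'⟩ := h'
  rcases lt_trichotomy i i' with hlt | heq | hgt
  · have := hfst' i hs hlt
    have := hmin i' hs' he'
    omega
  · exact heq
  · have := hfst i' hs' hgt
    have := hmin' i hs he
    omega

theorem pvFirstMax_unique {a : List Int} {s e i i' : Int}
    (h : pvFirstMax a s e i) (h' : pvFirstMax a s e i') : i = i' := by
  obtain ⟨hs, he, hmax, hfst⟩ := h
  obtain ⟨hs', he', hmax', hfst'⟩ := h'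
  rcases lt_trichotomy i i' with hlt | heq | hgt
  · have := hfst' i hs hlt
    have := hmax i' hs' he'
    omega
  · exact heq
  · have := hfst i' hs' hgt
    have := hmax' i hs he
    omega

-- the divide-and-conquer recursion returns the first min / first max index of a[s:e]
theorem pvExtrema_spec (n : Nat) : ∀ (a : List Int) (s e : Int), (e - s).toNat = n →
    s < e → pvFirstMin a s e (pvExtrema a s e).1 ∧ pvFirstMax a s e (pvExtrema a s e).2 := by
  induction n using Nat.strong_induction_on with
  | _ n ih =>
    intro a s e hn hse
    rw [pvExtrema]
    by_cases hb : e - s ≤ 1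
    · rw [if_pos hb]
      constructor
      · exact ⟨le_refl s, by omega,
          fun j h1 h2 => le_of_eq (by rw [show j = s by omega]),
          fun j h1 h2 => absurd h2 (by show ¬ (j < s); omega)⟩
      · exact ⟨le_refl s, by omega,
          fun j h1 h2 => le_of_eq (by rw [show j = s by omega]),
          fun j h1 h2 => absurd h2 (by show ¬ (j < s); omega)⟩
    · rw [if_neg hb]
      have h1 : s + 1 ≤ PySem.Int.floordiv (s + e) 2 :=
        (PySem.Int.le_floordiv_iff_mul_le (by omega)).mpr (by omega)
      have h2 : PySem.Int.floordiv (s + e) 2 < e :=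
        (PySem.Int.floordiv_lt_iff_lt_mul (by omega)).mpr (by omega)
      set m := PySem.Int.floordiv (s + e) 2 with hm
      obtain ⟨⟨hl1s, hl1e, hmin1, hfst1⟩, ⟨hh1s, hh1e, hmax1, hgst1⟩⟩ :=
        ih (m - s).toNat (by omega) a s m (rfl) (by omega)
      obtain ⟨⟨hl2s, hl2e, hmin2, hfst2⟩, ⟨hh2s, hh2e, hmax2, hgst2⟩⟩ :=
        ih (e - m).toNat (by omega) a m e (rfl) (by omega)
      dsimp only
      constructor
      · by_cases hc : PySem.List.pyGetD a (pvExtrema a s m).1 0 ≤ PySem.List.pyGetD a (pvExtrema a m e).1 0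
        · rw [if_pos hc]
          refine ⟨by omega, by omega, fun j hj1 hj2 => ?_, fun j hj1 hj2 => ?_⟩
          · by_cases hjm : j < m
            · exact hmin1 j hj1 hjm
            · exact le_trans hc (hmin2 j (by omega) hj2)
          · exact hfst1 j hj1 hj2
        · rw [if_neg hc]
          rw [not_le] at hc
          refine ⟨by omega, by omega, fun j hj1 hj2 => ?_, fun j hj1 hj2 => ?_⟩
          · by_cases hjm : j < m
            · exact le_trans (le_of_lt hc) (hmin1 j hj1 hjm)
            · exact hmin2 j (by omega) hj2
          · by_cases hjm : j < m
            · exact lt_of_lt_of_le hc (hmin1 j hj1 hjm)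
            · exact hfst2 j (by omega) hj2
      · by_cases hc : PySem.List.pyGetD a (pvExtrema a s m).2 0 ≥ PySem.List.pyGetD a (pvExtrema a m e).2 0
        · rw [if_pos hc]
          refine ⟨by omega, by omega, fun j hj1 hj2 => ?_, fun j hj1 hj2 => ?_⟩
          · by_cases hjm : j < m
            · exact hmax1 j hj1 hjm
            · exact le_trans (hmax2 j (by omega) hj2) hc
          · exact hgst1 j hj1 hj2
        · rw [if_neg hc]
          rw [not_le] at hc
          refine ⟨by omega, by omega, fun j hj1 hj2 => ?_, fun j hj1 hj2 => ?_⟩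
          · by_cases hjm : j < m
            · exact le_trans (hmax1 j hj1 hjm) (le_of_lt hc)
            · exact hmax2 j (by omega) hj2
          · by_cases hjm : j < m
            · exact lt_of_le_of_lt (hmax1 j hj1 hjm) hc
            · exact hgst2 j (by omega) hj2

-- A's min accumulator over the enumerated tail ends at the first index of the overall minimum
theorem pv_min_loop (t : List Int) : ∀ (k mi mv : Int),
    (PySem.List.enumerate t k).foldl
      (fun (s : Int × Int) (p : Int × Int) => if p.2 < s.2 then (p.1, p.2) else s) (mi, mv)
    = (if t.foldl min mv < mv then k + (t.idxOf (t.foldl min mv) : Int) else mi, t.foldl min mv) := by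
  induction t with
  | nil => intro k mi mv; simp [PySem.List.enumerate_nil]
  | cons a t ih =>
    intro k mi mv
    rw [PySem.List.enumerate_cons, List.foldl_cons]
    by_cases h : a < mv
    · rw [if_pos h, ih]
      have hle : t.foldl min a ≤ a := (PySem.List.foldl_min_le t a).1
      have hf : List.foldl min mv (a :: t) = t.foldl min a := by
        simp [List.foldl_cons, min_eq_right (le_of_lt h)]
      rw [hf]
      by_cases h2 : t.foldl min a < a
      · have hb : (a == List.foldl min a t) = false := by simp; omega
        rw [if_pos h2, if_pos (lt_trans h2 h), List.idxOf_cons, hb]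
        simp
        ring
      · have heq : t.foldl min a = a := le_antisymm hle (by omega)
        rw [if_neg h2]
        simp [heq, h]
    · rw [if_neg h, ih]
      have hf : List.foldl min mv (a :: t) = t.foldl min mv := by
        simp [List.foldl_cons, min_eq_left (by omega : mv ≤ a)]
      rw [hf]
      by_cases h2 : t.foldl min mv < mv
      · have hb : (a == List.foldl min mv t) = false := by simp; omega
        rw [if_pos h2, if_pos h2, List.idxOf_cons, hb]
        simp
        ring
      · rw [if_neg h2, if_neg h2]

-- symmetric: A's max accumulator ends at the first index of the overall maximum
theorem pv_max_loop (t : List Int) : ∀ (k mi mv : Int),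
    (PySem.List.enumerate t k).foldl
      (fun (s : Int × Int) (p : Int × Int) => if p.2 > s.2 then (p.1, p.2) else s) (mi, mv)
    = (if mv < t.foldl max mv then k + (t.idxOf (t.foldl max mv) : Int) else mi, t.foldl max mv) := by
  induction t with
  | nil => intro k mi mv; simp [PySem.List.enumerate_nil]
  | cons a t ih =>
    intro k mi mv
    rw [PySem.List.enumerate_cons, List.foldl_cons]
    by_cases h : a > mv
    · rw [if_pos h, ih]
      have hle : a ≤ t.foldl max a := (PySem.List.le_foldl_max t a).1
      have hf : List.foldl max mv (a :: t) = t.foldl max a := by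
        simp [List.foldl_cons, max_eq_right (le_of_lt h)]
      rw [hf]
      by_cases h2 : a < t.foldl max a
      · have hb : (a == List.foldl max a t) = false := by simp; omega
        rw [if_pos h2, if_pos (lt_trans h h2), List.idxOf_cons, hb]
        simp
        ring
      · have heq : t.foldl max a = a := le_antisymm (by omega) hle
        rw [if_neg h2]
        simp [heq, h]
    · rw [if_neg h, ih]
      have hf : List.foldl max mv (a :: t) = t.foldl max mv := by
        simp [List.foldl_cons, max_eq_left (by omega : a ≤ mv)]
      rw [hf]
      by_cases h2 : mv < t.foldl max mv
      · have hb : (a == List.foldl max mv t) = false := by simp; omega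
        rw [if_pos h2, if_pos h2, List.idxOf_cons, hb]
        simp
        ring
      · rw [if_neg h2, if_neg h2]

-- the first-occurrence index of the minimum value satisfies pvFirstMin over the whole list
theorem pv_idxOf_min (x : Int) (t : List Int) :
    pvFirstMin (x :: t) 0 ((x :: t).length : Int) ((x :: t).idxOf (t.foldl min x) : Int) := by
  have hmem : t.foldl min x ∈ x :: t := by
    rcases PySem.List.foldl_min_mem t x with h | h
    · rw [h]; exact List.mem_cons_self
    · exact List.mem_cons_of_mem _ h
  have hidx : PySem.List.index? (x :: t) (t.foldl min x) = some ((x :: t).idxOf (t.foldl min x)) := by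
    have hs : (PySem.List.index? (x :: t) (t.foldl min x)).isSome :=
      (PySem.List.index?_isSome_iff _ _).mpr hmem
    obtain ⟨k, hk⟩ := Option.isSome_iff_exists.mp hs
    rw [hk, List.idxOf_eq_getD_idxOf?, ← PySem.List.index?_eq_idxOf?, hk]; rfl
  obtain ⟨hk, hget, hbefore⟩ := PySem.List.getElem_of_index?_eq_some hidx
  have hlow : ∀ y ∈ x :: t, t.foldl min x ≤ y := by
    intro y hy
    rcases List.mem_cons.mp hy with h | h
    · rw [h]; exact (PySem.List.foldl_min_le t x).1
    · exact (PySem.List.foldl_min_le t x).2 y h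
  refine ⟨by omega, by exact_mod_cast hk, fun j hj1 hj2 => ?_, fun j hj1 hj2 => ?_⟩
  · rw [PySem.List.pyGetD_eq_getElem (x :: t) (i := (((x :: t).idxOf (t.foldl min x) : Nat) : Int)) 0
          (by omega) (by exact_mod_cast hk),
        PySem.List.pyGetD_eq_getElem (x :: t) (i := j) 0 hj1 hj2]
    simp only [Int.toNat_natCast, hget]
    exact hlow _ (List.getElem_mem _)
  · have hjk : j.toNat < (x :: t).idxOf (t.foldl min x) := by omega
    rw [PySem.List.pyGetD_eq_getElem (x :: t) (i := (((x :: t).idxOf (t.foldl min x) : Nat) : Int)) 0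
          (by omega) (by exact_mod_cast hk),
        PySem.List.pyGetD_eq_getElem (x :: t) (i := j) 0 hj1 (by omega)]
    simp only [Int.toNat_natCast, hget]
    have hne := hbefore j.toNat hjk
    have := hlow ((x :: t)[j.toNat]'(by omega)) (List.getElem_mem _)
    omega

theorem pv_idxOf_max (x : Int) (t : List Int) :
    pvFirstMax (x :: t) 0 ((x :: t).length : Int) ((x :: t).idxOf (t.foldl max x) : Int) := by
  have hmem : t.foldl max x ∈ x :: t := by
    rcases PySem.List.foldl_max_mem t x with h | h
    · rw [h]; exact List.mem_cons_self
    · exact List.mem_cons_of_mem _ h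
  have hidx : PySem.List.index? (x :: t) (t.foldl max x) = some ((x :: t).idxOf (t.foldl max x)) := by
    have hs : (PySem.List.index? (x :: t) (t.foldl max x)).isSome :=
      (PySem.List.index?_isSome_iff _ _).mpr hmem
    obtain ⟨k, hk⟩ := Option.isSome_iff_exists.mp hs
    rw [hk, List.idxOf_eq_getD_idxOf?, ← PySem.List.index?_eq_idxOf?, hk]; rfl
  obtain ⟨hk, hget, hbefore⟩ := PySem.List.getElem_of_index?_eq_some hidx
  have hhigh : ∀ y ∈ x :: t, y ≤ t.foldl max x := by
    intro y hy
    rcases List.mem_cons.mp hy with h | h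
    · rw [h]; exact (PySem.List.le_foldl_max t x).1
    · exact (PySem.List.le_foldl_max t x).2 y h
  refine ⟨by omega, by exact_mod_cast hk, fun j hj1 hj2 => ?_, fun j hj1 hj2 => ?_⟩
  · rw [PySem.List.pyGetD_eq_getElem (x :: t) (i := (((x :: t).idxOf (t.foldl max x) : Nat) : Int)) 0
          (by omega) (by exact_mod_cast hk),
        PySem.List.pyGetD_eq_getElem (x :: t) (i := j) 0 hj1 hj2]
    simp only [Int.toNat_natCast, hget]
    exact hhigh _ (List.getElem_mem _)
  · have hjk : j.toNat < (x :: t).idxOf (t.foldl max x) := by omega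
    rw [PySem.List.pyGetD_eq_getElem (x :: t) (i := (((x :: t).idxOf (t.foldl max x) : Nat) : Int)) 0
          (by omega) (by exact_mod_cast hk),
        PySem.List.pyGetD_eq_getElem (x :: t) (i := j) 0 hj1 (by omega)]
    simp only [Int.toNat_natCast, hget]
    have hne := hbefore j.toNat hjk
    have := hhigh ((x :: t)[j.toNat]'(by omega)) (List.getElem_mem _)
    omega

-- ===== VERDICT (by name: the statement is the Claim_ definition above) =====
theorem sum_between_min_and_max_spec : Claim_equal_sum_between_min_and_max := by
  intro numbers _
  unfold Spec_sum_between_min_and_max sum_between_min_and_max sum_between_min_and_max_alt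
  by_cases hlen : numbers.length ≤ 2
  · rw [if_pos hlen, if_pos hlen]
  · rw [if_neg hlen, if_neg hlen]
    match numbers, hlen with
    | x :: t, hlen =>
      simp only [List.headD_cons]
      rw [PySem.List.enumerate_cons, List.foldl_cons]
      simp only [lt_irrefl, gt_iff_lt, if_false]
      rw [PySem.List.foldl_prod_mk
            (f := fun (s : Int × Int) (p : Int × Int) => if p.2 < s.2 then (p.1, p.2) else s)
            (g := fun (s : Int × Int) (p : Int × Int) => if p.2 > s.2 then (p.1, p.2) else s),
          pv_min_loop, pv_max_loop]
      dsimp only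
      simp only [zero_add]
      obtain ⟨hfmin, hfmax⟩ := pvExtrema_spec ((((x :: t).length : Int) - 0).toNat) (x :: t)
          0 ((x :: t).length : Int) rfl (by simp)
      have hL : (pvExtrema (x :: t) 0 ((x :: t).length : Int)).1
          = ((x :: t).idxOf (t.foldl min x) : Int) :=
        pvFirstMin_unique hfmin (pv_idxOf_min x t)
      have hH : (pvExtrema (x :: t) 0 ((x :: t).length : Int)).2
          = ((x :: t).idxOf (t.foldl max x) : Int) :=
        pvFirstMax_unique hfmax (pv_idxOf_max x t)
      rw [hL, hH]
      have hmin : (if t.foldl min x < x then 1 + (t.idxOf (t.foldl min x) : Int) else 0)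
          = ((x :: t).idxOf (t.foldl min x) : Int) := by
        have hle : t.foldl min x ≤ x := (PySem.List.foldl_min_le t x).1
        by_cases h : t.foldl min x < x
        · have hb : (x == t.foldl min x) = false := by simp; omega
          rw [if_pos h, List.idxOf_cons, hb]
          simp; ring
        · have heq : t.foldl min x = x := le_antisymm hle (by omega)
          rw [if_neg h]
          simp [heq]
      have hmax : (if x < t.foldl max x then 1 + (t.idxOf (t.foldl max x) : Int) else 0)
          = ((x :: t).idxOf (t.foldl max x) : Int) := by
        have hle : x ≤ t.foldl max x := (PySem.List.le_foldl_max t x).1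
        by_cases h : x < t.foldl max x
        · have hb : (x == t.foldl max x) = false := by simp; omega
          rw [if_pos h, List.idxOf_cons, hb]
          simp; ring
        · have heq : t.foldl max x = x := le_antisymm (by omega) hle
          rw [if_neg h]
          simp [heq]
      rw [hmin, hmax]
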